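-- pv_equiv track=rewrite | github.com/rodrigoioyz/cardumen-forge | scripts/add_property_tests.py | build_test_body
-- ===== SOURCE A (Python) =====
-- def build_test_body(name: str, args: list[tuple[str, str]], assertion: str) -> str:
--     """
--     Build a complete test block using fuzz.both/tuple for multiple args.
--     assertion uses the arg names and fn name directly.
--     """
--     if not args:
--         return f'{assertion}'
--
--     if len(args) == 1:
--         arg_name, fuzzer = args[0]
--         via   = fuzzer
--         param = f'{arg_name} via {via}'
--         setup = ''
--         call_args = arg_name
--     elif len(args) == 2:
--         (n1, f1), (n2, f2) = args
--         param = f'vals via fuzz.both({f1}, {f2})'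
--         setup = f'let ({n1}, {n2}) = vals\n  '
--         call_args = f'{n1}, {n2}'
--     elif len(args) == 3:
--         (n1, f1), (n2, f2), (n3, f3) = args
--         param = f'vals via fuzz.tuple3({f1}, {f2}, {f3})'
--         setup = f'let ({n1}, {n2}, {n3}) = vals\n  '
--         call_args = f'{n1}, {n2}, {n3}'
--     elif len(args) == 4:
--         (n1, f1), (n2, f2), (n3, f3), (n4, f4) = args
--         param = f'vals via fuzz.tuple4({f1}, {f2}, {f3}, {f4})'
--         setup = f'let ({n1}, {n2}, {n3}, {n4}) = vals\n  '
--         call_args = f'{n1}, {n2}, {n3}, {n4}'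
--     else:
--         return None  # too many args
--
--     filled = assertion.replace('CALL', f'{name}({call_args})')
--     for n, _ in args:
--         filled = filled.replace(f'ARG_{n}', n)
--
--     return f'test PROP_NAME({param}) {{\n  {setup}{filled}\n}}'
-- ===== SOURCE B (Python) =====
-- def build_test_body(name: str, args: list[tuple[str, str]], assertion: str) -> str:
--     if not args:
--         return assertion
--     k = len(args)
--     if k > 4:
--         return None
--     names = [n for n, _ in args]
--     fuzzers = [f for _, f in args]
--     if k == 1:
--         param = f'{names[0]} via {fuzzers[0]}'
--         setup = ''
--     else:
--         combinator = 'fuzz.both' if k == 2 else f'fuzz.tuple{k}'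
--         param = f'vals via {combinator}({", ".join(fuzzers)})'
--         setup = f'let ({", ".join(names)}) = vals\n  '
--     call_args = ', '.join(names)
--     filled = assertion.replace('CALL', f'{name}({call_args})')
--     for n in names:
--         filled = filled.replace(f'ARG_{n}', n)
--     return f'test PROP_NAME({param}) {{\n  {setup}{filled}\n}}'
-- ===== Notes on version B (the rewrite author's own statement) =====
-- stated objective: simpler
-- what changed: Replaces A's four hand-unpacked per-arity branches with one generic path: project names/fuzzers once, pick the combinator name from len(args) ('fuzz.both' for 2, f'fuzz.tuple{k}' otherwise), and build param/setup/call_args with ', '.join.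
import Mathlib
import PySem

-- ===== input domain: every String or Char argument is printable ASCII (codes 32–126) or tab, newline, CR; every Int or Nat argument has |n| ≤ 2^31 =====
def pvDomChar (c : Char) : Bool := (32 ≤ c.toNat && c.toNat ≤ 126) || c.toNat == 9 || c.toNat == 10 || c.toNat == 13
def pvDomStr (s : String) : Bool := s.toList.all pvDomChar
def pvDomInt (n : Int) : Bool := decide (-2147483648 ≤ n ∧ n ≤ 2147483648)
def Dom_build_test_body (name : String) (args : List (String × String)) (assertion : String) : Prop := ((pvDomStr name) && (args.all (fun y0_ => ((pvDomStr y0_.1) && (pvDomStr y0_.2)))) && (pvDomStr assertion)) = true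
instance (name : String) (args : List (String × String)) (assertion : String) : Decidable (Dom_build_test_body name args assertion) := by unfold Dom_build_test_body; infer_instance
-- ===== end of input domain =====

-- B rebuilds the 2–4 argument cases generically (name/fuzzer projections + ', '.join + a
-- combinator name computed from len(args)) instead of A's four hand-unpacked branches: simpler.

-- ===== PORT A =====
-- A's per-arity branches, each producing (param, setup, call_args); none = A's `return None`.
def pvPiecesA (args : List (String × String)) : Option (String × String × String) :=
  match args with
  | [(n1, f1)] =>
    some (n1 ++ " via " ++ f1, "", n1)
  | [(n1, f1), (n2, f2)] =>
    some ("vals via fuzz.both(" ++ f1 ++ ", " ++ f2 ++ ")",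
          "let (" ++ n1 ++ ", " ++ n2 ++ ") = vals\n  ",
          n1 ++ ", " ++ n2)
  | [(n1, f1), (n2, f2), (n3, f3)] =>
    some ("vals via fuzz.tuple3(" ++ f1 ++ ", " ++ f2 ++ ", " ++ f3 ++ ")",
          "let (" ++ n1 ++ ", " ++ n2 ++ ", " ++ n3 ++ ") = vals\n  ",
          n1 ++ ", " ++ n2 ++ ", " ++ n3)
  | [(n1, f1), (n2, f2), (n3, f3), (n4, f4)] =>
    some ("vals via fuzz.tuple4(" ++ f1 ++ ", " ++ f2 ++ ", " ++ f3 ++ ", " ++ f4 ++ ")",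
          "let (" ++ n1 ++ ", " ++ n2 ++ ", " ++ n3 ++ ", " ++ n4 ++ ") = vals\n  ",
          n1 ++ ", " ++ n2 ++ ", " ++ n3 ++ ", " ++ n4)
  | _ => none

def build_test_body (name : String) (args : List (String × String)) (assertion : String) : Option String :=
  if args = [] then some assertion
  else
    match pvPiecesA args with
    | none => none
    | some (param, setup, call_args) =>
      let filled := PySem.Str.replace assertion "CALL" (name ++ "(" ++ call_args ++ ")")
      let filled := args.foldl (fun acc p => PySem.Str.replace acc ("ARG_" ++ p.1) p.1) filled
      some ("test PROP_NAME(" ++ param ++ ") {\n  " ++ setup ++ filled ++ "\n}")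

-- ===== PORT B =====
def build_test_body_alt (name : String) (args : List (String × String)) (assertion : String) : Option String :=
  match args with
  | [] => some assertion
  | (n0, f0) :: rest =>
    let k := args.length
    if k > 4 then none
    else
      let names := n0 :: rest.map Prod.fst
      let fuzzers := f0 :: rest.map Prod.snd
      let ps :=
        if k = 1 then (n0 ++ " via " ++ f0, "")
        else
          let combinator := if k = 2 then "fuzz.both" else "fuzz.tuple" ++ PySem.Int.toStr (k : Int)
          ("vals via " ++ combinator ++ "(" ++ PySem.Str.join ", " fuzzers ++ ")",
           "let (" ++ PySem.Str.join ", " names ++ ") = vals\n  ")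
      let call_args := PySem.Str.join ", " names
      let filled := PySem.Str.replace assertion "CALL" (name ++ "(" ++ call_args ++ ")")
      let filled := names.foldl (fun acc n => PySem.Str.replace acc ("ARG_" ++ n) n) filled
      some ("test PROP_NAME(" ++ ps.1 ++ ") {\n  " ++ ps.2 ++ filled ++ "\n}")

-- ===== PRECONDITION & SPEC =====
def Spec_build_test_body (name : String) (args : List (String × String)) (assertion : String) (out : Option String) : Prop := out = build_test_body_alt name args assertion
instance (name : String) (args : List (String × String)) (assertion : String) (out : Option String) : Decidable (Spec_build_test_body name args assertion out) := by unfold Spec_build_test_body; infer_instance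

-- ===== CLAIM (what is proved, stated in full; the proofs are below) =====
def Claim_equal_build_test_body : Prop := ∀ (name : String) (args : List (String × String)) (assertion : String), Dom_build_test_body name args assertion → Spec_build_test_body name args assertion (build_test_body name args assertion)

-- ===== LEMMAS AND PROOFS =====
theorem pvJoin_two (a b : String) : PySem.Str.join ", " [a, b] = a ++ ", " ++ b := by
  apply String.toList_inj.mp
  simp [PySem.Str.join, PySem.Chars.join_cons_cons, PySem.Chars.join_singleton]

theorem pvJoin_three (a b c : String) :
    PySem.Str.join ", " [a, b, c] = a ++ ", " ++ b ++ ", " ++ c := by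
  apply String.toList_inj.mp
  simp [PySem.Str.join, PySem.Chars.join_cons_cons, PySem.Chars.join_singleton]

theorem pvJoin_four (a b c d : String) :
    PySem.Str.join ", " [a, b, c, d] = a ++ ", " ++ b ++ ", " ++ c ++ ", " ++ d := by
  apply String.toList_inj.mp
  simp [PySem.Str.join, PySem.Chars.join_cons_cons, PySem.Chars.join_singleton]

theorem pvToChars3 : PySem.Int.toChars 3 = ['3'] := by decide
theorem pvToChars4 : PySem.Int.toChars 4 = ['4'] := by decide

-- ===== VERDICT (by name: the statement is the Claim_ definition above) =====
theorem build_test_body_spec : Claim_equal_build_test_body := by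
  intro name args assertion _
  unfold Spec_build_test_body
  match args with
  | [] => rfl
  | [(n1, f1)] =>
    simp [build_test_body, build_test_body_alt, pvPiecesA, PySem.Str.join]
  | [(n1, f1), (n2, f2)] =>
    simp [build_test_body, build_test_body_alt, pvPiecesA, pvJoin_two]
    apply String.toList_inj.mp; simp
  | [(n1, f1), (n2, f2), (n3, f3)] =>
    simp [build_test_body, build_test_body_alt, pvPiecesA, pvJoin_three]
    apply String.toList_inj.mp; simp [pvToChars3]
  | [(n1, f1), (n2, f2), (n3, f3), (n4, f4)] =>
    simp [build_test_body, build_test_body_alt, pvPiecesA, pvJoin_four]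
    apply String.toList_inj.mp; simp [pvToChars4]
  | (a :: b :: c :: d :: e :: rest) =>
    simp [build_test_body, build_test_body_alt, pvPiecesA]
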